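-- pv_equiv track=rewrite | github.com/owais-ch/Strings | modified_string.py | modified
-- ===== SOURCE A (Python) =====
-- def modified(s):
--     count=1
--     total=0
--
--     length=len(s)
--
--     for i in range(1,length):
--         if s[i]==s[i-1]:
--             count+=1
--             if count==3:
--                 total+=1
--                 count=1
--         else:
--             count=1
--
--     return total
-- ===== SOURCE B (Python) =====
-- def modified(s):
--     # Two-pointer scan over maximal runs of equal characters:
--     # a run of length L contributes (L - 1) // 2 triples.
--     total = 0
--     i = 0
--     n = len(s)
--     while i < n:
--         j = i
--         while j < n and s[j] == s[i]:
--             j += 1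
--         total += (j - i - 1) // 2
--         i = j
--     return total
-- ===== Notes on version B (the rewrite author's own statement) =====
-- stated objective: alternative
-- what changed: Replaces A's stateful reset-counter pass with a two-pointer scan over maximal runs of equal characters, adding the closed-form count (L-1)//2 per run.
import Mathlib
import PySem

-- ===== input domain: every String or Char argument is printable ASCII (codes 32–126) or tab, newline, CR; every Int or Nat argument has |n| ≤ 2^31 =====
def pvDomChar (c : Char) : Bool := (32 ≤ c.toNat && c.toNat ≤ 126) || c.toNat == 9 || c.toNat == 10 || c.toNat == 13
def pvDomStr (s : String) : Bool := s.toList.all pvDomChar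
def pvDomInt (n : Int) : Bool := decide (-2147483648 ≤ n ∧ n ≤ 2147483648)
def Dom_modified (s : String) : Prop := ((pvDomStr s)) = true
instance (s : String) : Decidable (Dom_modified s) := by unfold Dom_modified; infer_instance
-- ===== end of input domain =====

-- B replaces A's stateful reset-counter pass with a two-pointer scan over maximal
-- runs of equal characters, adding the closed-form count (L-1)//2 per run.

-- ===== PORT A =====
-- A's loop 'for i in range(1, len(s))' compares s[i] with s[i-1]; ported as the
-- structural recursion over the character list carrying the same (count, total)
-- state, with 'prev' standing for s[i-1].
def modifiedLoop (prev : Char) (count total : Int) : List Char → Int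
  | [] => total
  | c :: cs =>
      if c = prev then
        if count + 1 = 3 then modifiedLoop c 1 (total + 1) cs
        else modifiedLoop c (count + 1) total cs
      else modifiedLoop c 1 total cs

def modified (s : String) : Int :=
  match s.toList with
  | [] => 0
  | c :: cs => modifiedLoop c 1 0 cs

-- ===== PORT B =====
-- inner 'while j < n and s[j] == s[i]' of Source B: returns the index past the run.
-- fuel (= remaining indices) only makes the loop structurally total; the
-- branch structure is Source B's.
def runEnd (l : List Char) (c : Char) (j : Nat) : Nat → Nat
  | 0 => j
  | fuel + 1 =>
    if j < l.length then
      if l.getD j ' ' = c then runEnd l c (j + 1) fuel else j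
    else j

-- outer 'while i < n' of Source B
def outerLoop (l : List Char) (i : Nat) (total : Int) : Nat → Int
  | 0 => total
  | fuel + 1 =>
    if i < l.length then
      let j := runEnd l (l.getD i ' ') i (l.length - i)
      outerLoop l j (total + (((j - i - 1) / 2 : Nat) : Int)) fuel
    else total

def modified_alt (s : String) : Int := outerLoop s.toList 0 0 (s.toList.length + 1)

-- ===== PRECONDITION & SPEC =====
def Spec_modified (s : String) (out : Int) : Prop := out = modified_alt s
instance (s : String) (out : Int) : Decidable (Spec_modified s out) := by unfold Spec_modified; infer_instance

-- ===== CLAIM (what is proved, stated in full; the proofs are below) =====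
def Claim_equal_modified : Prop := ∀ (s : String), Dom_modified s → Spec_modified s (modified s)

-- ===== LEMMAS AND PROOFS =====

-- proof-side view: the list of maximal run lengths, and the triple count per run
def runsGo (c : Char) (m : Nat) : List Char → List Nat
  | [] => [m]
  | x :: xs => if x = c then runsGo x (m + 1) xs else m :: runsGo x 1 xs

def runs : List Char → List Nat
  | [] => []
  | c :: cs => runsGo c 1 cs

def runSum (rs : List Nat) : Int := (rs.map (fun L => (((L - 1) / 2 : Nat) : Int))).sum

theorem runsGo_spec (xs : List Char) : ∀ (c : Char) (m : Nat),
    runsGo c m xs =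
      (m + (xs.takeWhile (fun x => x = c)).length) :: runs (xs.dropWhile (fun x => x = c)) := by
  induction xs with
  | nil => intro c m; simp [runsGo, runs]
  | cons x xs ih =>
    intro c m
    by_cases hx : x = c
    · subst hx
      simp only [runsGo, if_pos rfl, List.takeWhile_cons, List.dropWhile_cons,
        decide_true, if_true, ih, List.length_cons]
      congr 1
      omega
    · simp [runsGo, List.takeWhile_cons, List.dropWhile_cons, hx, runs]

-- ===== A-side characterisation =====
-- invariant: with m chars of the current run consumed and counter n ∈ {1,2},
-- already (m-1)/2 triples of this run were counted, and m ≡ n (mod 2)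
theorem loopA_spec (cs : List Char) : ∀ (p : Char) (n : Nat) (m : Nat) (total : Int),
    (n = 1 ∨ n = 2) → n ≤ m → m % 2 = n % 2 →
    modifiedLoop p (n : Int) total cs = total + runSum (runsGo p m cs) - (((m - 1) / 2 : Nat) : Int) := by
  induction cs with
  | nil =>
    intro p n m total _ _ _
    simp [modifiedLoop, runsGo, runSum]
  | cons c cs ih =>
    intro p n m total hn hnm hpar
    by_cases hc : c = p
    · subst hc
      rcases hn with rfl | rfl
      · -- counter 1 → 2, no triple
        have h1 : modifiedLoop c ((1 : Nat) : Int) total (c :: cs)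
            = modifiedLoop c ((2 : Nat) : Int) total cs := by
          simp only [modifiedLoop, if_pos rfl]
          norm_num
        rw [h1, ih c 2 (m + 1) total (Or.inr rfl) (by omega) (by omega)]
        have hr : runsGo c m (c :: cs) = runsGo c (m + 1) cs := by simp [runsGo]
        rw [hr, show (m + 1 - 1) / 2 = (m - 1) / 2 from by omega]
      · -- counter hits 3: one triple, reset to 1
        have h1 : modifiedLoop c ((2 : Nat) : Int) total (c :: cs)
            = modifiedLoop c ((1 : Nat) : Int) (total + 1) cs := by
          simp only [modifiedLoop, if_pos rfl]
          norm_num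
        rw [h1, ih c 1 (m + 1) (total + 1) (Or.inl rfl) (by omega) (by omega)]
        have hr : runsGo c m (c :: cs) = runsGo c (m + 1) cs := by simp [runsGo]
        rw [hr]
        have hcast : (((m + 1 - 1) / 2 : Nat) : Int) = (((m - 1) / 2 : Nat) : Int) + 1 := by
          rw [show (m + 1 - 1) / 2 = (m - 1) / 2 + 1 from by omega]
          push_cast
          ring
        rw [hcast]
        ring
    · -- new run starts at c
      have h1 : modifiedLoop p ((n : Nat) : Int) total (c :: cs)
          = modifiedLoop c ((1 : Nat) : Int) total cs := by
        simp only [modifiedLoop, if_neg hc]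
        norm_num
      rw [h1, ih c 1 1 total (Or.inl rfl) (by omega) (by omega)]
      have hr : runsGo p m (c :: cs) = m :: runsGo c 1 cs := by simp [runsGo, hc]
      rw [hr]
      simp [runSum]
      ring

theorem dropWhile_eq_drop_len (q : Char → Bool) (xs : List Char) :
    xs.drop (xs.takeWhile q).length = xs.dropWhile q := by
  induction xs with
  | nil => simp
  | cons x xs ih =>
    by_cases h : q x <;> simp [List.takeWhile_cons, List.dropWhile_cons, h, ih]

theorem modified_eq_runSum (s : String) : modified s = runSum (runs s.toList) := by
  cases h : s.toList with
  | nil => simp [modified, h, runs, runSum]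
  | cons c cs =>
    have h0 : modified s = modifiedLoop c 1 0 cs := by simp [modified, h]
    rw [h0, show (1 : Int) = ((1 : Nat) : Int) from by norm_num,
      loopA_spec cs c 1 1 0 (Or.inl rfl) (by omega) (by omega)]
    simp [runs]

-- ===== B-side characterisation =====
theorem runEnd_spec (l : List Char) (c : Char) : ∀ (fuel j : Nat), j ≤ l.length →
    l.length - j ≤ fuel →
    runEnd l c j fuel = j + ((l.drop j).takeWhile (fun x => x = c)).length := by
  intro fuel
  induction fuel with
  | zero =>
    intro j hj hf
    have : j = l.length := by omega
    subst this
    simp [runEnd]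
  | succ fuel ih =>
    intro j hj hf
    simp only [runEnd]
    split
    · rename_i h
      have hd : l.drop j = l.getD j ' ' :: l.drop (j + 1) := by
        rw [List.getD_eq_getElem l ' ' h]
        exact List.drop_eq_getElem_cons h
      rw [hd]
      split
      · rename_i he
        rw [ih (j + 1) (by omega) (by omega)]
        simp only [List.takeWhile_cons, he, decide_true, if_true, List.length_cons]
        omega
      · rename_i he
        simp only [List.getD_eq_getElem?_getD] at he
        simp [he]
    · rename_i h
      have : l.drop j = [] := List.drop_eq_nil_of_le (by omega)
      simp [this]

theorem outerLoop_spec (l : List Char) : ∀ (fuel i : Nat) (total : Int), i ≤ l.length →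
    l.length - i + 1 ≤ fuel →
    outerLoop l i total fuel = total + runSum (runs (l.drop i)) := by
  intro fuel
  induction fuel with
  | zero => intro i total _ hf; omega
  | succ fuel ih =>
    intro i total hi hf
    simp only [outerLoop]
    split
    · rename_i h
      have hd : l.drop i = l.getD i ' ' :: l.drop (i + 1) := by
        rw [List.getD_eq_getElem l ' ' h]
        exact List.drop_eq_getElem_cons h
      have hj : runEnd l (l.getD i ' ') i (l.length - i)
          = i + 1 + ((l.drop (i + 1)).takeWhile (fun x => x = l.getD i ' ')).length := by
        rw [runEnd_spec l (l.getD i ' ') (l.length - i) i (le_of_lt h) (by omega), hd]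
        simp
        omega
      have htle : ((l.drop (i + 1)).takeWhile (fun x => x = l.getD i ' ')).length ≤ l.length - (i + 1) := by
        have h1 : ((l.drop (i + 1)).takeWhile (fun x => x = l.getD i ' ')).length
            ≤ (l.drop (i + 1)).length := (List.takeWhile_sublist _).length_le
        rw [List.length_drop] at h1
        omega
      rw [hj, ih _ _ (by omega) (by omega)]
      have hdropj : l.drop (i + 1 + ((l.drop (i + 1)).takeWhile (fun x => x = l.getD i ' ')).length)
          = (l.drop (i + 1)).dropWhile (fun x => x = l.getD i ' ') := by
        rw [← List.drop_drop]
        exact dropWhile_eq_drop_len _ _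
      rw [hdropj, hd]
      have hruns : runs (l.getD i ' ' :: l.drop (i + 1))
          = (1 + ((l.drop (i + 1)).takeWhile (fun x => x = l.getD i ' ')).length)
            :: runs ((l.drop (i + 1)).dropWhile (fun x => x = l.getD i ' ')) := by
        have h1 : runs (l.getD i ' ' :: l.drop (i + 1)) = runsGo (l.getD i ' ') 1 (l.drop (i + 1)) := rfl
        rw [h1, runsGo_spec]
      rw [hruns]
      simp only [runSum, List.map_cons, List.sum_cons]
      rw [show i + 1 + ((l.drop (i + 1)).takeWhile (fun x => x = l.getD i ' ')).length - i - 1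
            = ((l.drop (i + 1)).takeWhile (fun x => x = l.getD i ' ')).length from by omega,
          show 1 + ((l.drop (i + 1)).takeWhile (fun x => x = l.getD i ' ')).length - 1
            = ((l.drop (i + 1)).takeWhile (fun x => x = l.getD i ' ')).length from by omega]
      ring
    · rename_i h
      have : l.drop i = [] := List.drop_eq_nil_of_le (by omega)
      simp [this, runs, runSum]

theorem modified_alt_eq_runSum (s : String) : modified_alt s = runSum (runs s.toList) := by
  unfold modified_alt
  rw [outerLoop_spec s.toList (s.toList.length + 1) 0 0 (by omega) (by omega)]
  simp

-- ===== VERDICT (by name: the statement is the Claim_ definition above) =====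
theorem modified_spec : Claim_equal_modified := by
  intro s _
  unfold Spec_modified
  rw [modified_eq_runSum, modified_alt_eq_runSum]
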